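-- pv_equiv track=rewrite | github.com/Arilson-X/Desafio-Python-Syngenta | src/my_module.py | calculo_valor_Ridgewood
-- ===== SOURCE A (Python) =====
-- def calculo_valor_Ridgewood(cliente,list_data):
--     soma = 0
--     if(cliente == "Regular:"):
--         for data in list_data:
--             if(data.find("(sun)") != -1 or  data.find("(sat)") != -1):
--                 soma = soma + 150
--             else:
--                 soma = soma + 220
--         return soma
--     else:
--         for data in list_data:
--             if(data.find("(sun)") != -1 or  data.find("(sat)") != -1):
--                 soma = soma + 40
--             else:
--                 soma = soma + 100
--         return soma
-- ===== SOURCE B (Python) =====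
-- def calculo_valor_Ridgewood(cliente, list_data):
--     regular = cliente == "Regular:"
--
--     def total(xs):
--         if not xs:
--             return 0
--         if len(xs) == 1:
--             weekend = "(sun)" in xs[0] or "(sat)" in xs[0]
--             if regular:
--                 return 150 if weekend else 220
--             return 40 if weekend else 100
--         mid = len(xs) // 2
--         return total(xs[:mid]) + total(xs[mid:])
--
--     return total(list_data)
-- ===== Notes on version B (the rewrite author's own statement) =====
-- stated objective: alternative
-- what changed: Replaces A's linear accumulator loops by a divide-and-conquer recursion that splits the list in half, prices each half recursively and adds the halves (correct because the total is a sum, hence associative over any split).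
import Mathlib
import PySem

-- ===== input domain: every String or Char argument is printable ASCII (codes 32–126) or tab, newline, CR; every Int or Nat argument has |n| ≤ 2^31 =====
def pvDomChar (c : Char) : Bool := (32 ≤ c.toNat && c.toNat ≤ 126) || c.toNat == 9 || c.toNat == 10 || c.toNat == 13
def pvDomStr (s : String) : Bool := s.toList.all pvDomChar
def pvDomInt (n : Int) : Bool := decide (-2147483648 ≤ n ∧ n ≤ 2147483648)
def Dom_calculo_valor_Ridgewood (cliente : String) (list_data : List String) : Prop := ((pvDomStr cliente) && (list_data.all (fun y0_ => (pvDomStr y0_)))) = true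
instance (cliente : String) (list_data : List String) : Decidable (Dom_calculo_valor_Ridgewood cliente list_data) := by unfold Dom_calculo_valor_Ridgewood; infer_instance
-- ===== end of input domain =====

-- B prices the list by divide-and-conquer recursion (split in half, add the halves) instead of A's accumulator loops; alternative decomposition, same cost.

-- ===== PORT A =====
def calculo_valor_Ridgewood (cliente : String) (list_data : List String) : Int :=
  if cliente == "Regular:" then
    list_data.foldl (fun soma data =>
      if PySem.Str.find data "(sun)" ≠ -1 ∨ PySem.Str.find data "(sat)" ≠ -1
      then soma + 150 else soma + 220) 0
  else
    list_data.foldl (fun soma data =>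
      if PySem.Str.find data "(sun)" ≠ -1 ∨ PySem.Str.find data "(sat)" ≠ -1
      then soma + 40 else soma + 100) 0

-- ===== PORT B =====
-- helper `total` of Source B: divide-and-conquer over the list; xs[:mid]/xs[mid:] with
-- 0 ≤ mid ≤ len(xs) are exactly List.take/List.drop.
def pvTotal (regular : Bool) (xs : List String) : Int :=
  match xs with
  | [] => 0
  | [d] =>
      let weekend := PySem.Str.isIn "(sun)" d || PySem.Str.isIn "(sat)" d
      if regular then (if weekend then 150 else 220)
      else (if weekend then 40 else 100)
  | x1 :: x2 :: rest =>
      let mid := (x1 :: x2 :: rest).length / 2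
      pvTotal regular ((x1 :: x2 :: rest).take mid) +
      pvTotal regular ((x1 :: x2 :: rest).drop mid)
termination_by xs.length
decreasing_by
  · simp [List.length_take]; omega
  · simp; omega

def calculo_valor_Ridgewood_alt (cliente : String) (list_data : List String) : Int :=
  let regular := cliente == "Regular:"
  pvTotal regular list_data

-- ===== PRECONDITION & SPEC =====
def Spec_calculo_valor_Ridgewood (cliente : String) (list_data : List String) (out : Int) : Prop := out = calculo_valor_Ridgewood_alt cliente list_data
instance (cliente : String) (list_data : List String) (out : Int) : Decidable (Spec_calculo_valor_Ridgewood cliente list_data out) := by unfold Spec_calculo_valor_Ridgewood; infer_instance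

-- ===== CLAIM =====
def Claim_equal_calculo_valor_Ridgewood : Prop := ∀ (cliente : String) (list_data : List String), Dom_calculo_valor_Ridgewood cliente list_data → Spec_calculo_valor_Ridgewood cliente list_data (calculo_valor_Ridgewood cliente list_data)

-- ===== LEMMAS AND PROOFS =====
-- per-element rate shared by both sides
def pvRate (regular : Bool) (d : String) : Int :=
  if PySem.Str.find d "(sun)" ≠ -1 ∨ PySem.Str.find d "(sat)" ≠ -1
  then (if regular then 150 else 40) else (if regular then 220 else 100)

theorem pvTotal_single (regular : Bool) (d : String) :
    pvTotal regular [d] = pvRate regular d := by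
  have key : (PySem.Str.isIn "(sun)" d || PySem.Str.isIn "(sat)" d) = true ↔
      (PySem.Str.find d "(sun)" ≠ -1 ∨ PySem.Str.find d "(sat)" ≠ -1) := by
    rw [Bool.or_eq_true, PySem.Str.isIn_iff_infix, PySem.Str.isIn_iff_infix,
        ← PySem.Str.find_ne_neg_one_iff, ← PySem.Str.find_ne_neg_one_iff]
  rw [pvTotal]
  unfold pvRate
  by_cases hcond : PySem.Str.find d "(sun)" ≠ -1 ∨ PySem.Str.find d "(sat)" ≠ -1
  · rw [key.mpr hcond, if_pos hcond]
    cases regular <;> simp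
  · have hb : (PySem.Str.isIn "(sun)" d || PySem.Str.isIn "(sat)" d) = false := by
      cases hx : (PySem.Str.isIn "(sun)" d || PySem.Str.isIn "(sat)" d) with
      | false => rfl
      | true => exact absurd (key.mp hx) hcond
    rw [hb, if_neg hcond]
    cases regular <;> simp

theorem pvTotal_eq_sum (regular : Bool) :
    ∀ (n : Nat) (xs : List String), xs.length ≤ n →
      pvTotal regular xs = (xs.map (pvRate regular)).sum := by
  intro n
  induction n with
  | zero =>
      intro xs h
      have : xs = [] := List.length_eq_zero_iff.mp (Nat.le_zero.mp h)
      subst this; rw [pvTotal]; rfl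
  | succ n ih =>
      intro xs h
      match xs with
      | [] => rw [pvTotal]; rfl
      | [d] => rw [pvTotal_single]; simp
      | x1 :: x2 :: rest =>
          rw [pvTotal]
          have hlen : (x1 :: x2 :: rest).length = rest.length + 2 := by simp
          have hmid : (x1 :: x2 :: rest).length / 2 ≥ 1 ∧
              (x1 :: x2 :: rest).length / 2 < (x1 :: x2 :: rest).length := by
            rw [hlen]; omega
          rw [ih _ (by simp [List.length_take]; simp at h ⊢; omega),
              ih _ (by simp at h ⊢; omega),
              ← List.sum_append, ← List.map_append, List.take_append_drop]

theorem foldl_rate (regular : Bool) (l : List String) (a : Int) :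
    l.foldl (fun s d =>
      if PySem.Str.find d "(sun)" ≠ -1 ∨ PySem.Str.find d "(sat)" ≠ -1
      then s + (if regular then 150 else 40)
      else s + (if regular then 220 else 100)) a
    = a + (l.map (pvRate regular)).sum := by
  induction l generalizing a with
  | nil => simp
  | cons d t ih =>
      rw [List.foldl_cons, ih, List.map_cons, List.sum_cons]
      unfold pvRate
      split_ifs <;> ring

-- ===== VERDICT =====
theorem calculo_valor_Ridgewood_spec : Claim_equal_calculo_valor_Ridgewood := by
  intro cliente list_data _
  unfold Spec_calculo_valor_Ridgewood calculo_valor_Ridgewood calculo_valor_Ridgewood_alt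
  rw [pvTotal_eq_sum (cliente == "Regular:") list_data.length list_data le_rfl]
  by_cases hc : cliente == "Regular:"
  · rw [if_pos hc, hc]
    have := foldl_rate true list_data 0
    simp only [if_true] at this
    rw [this, zero_add]
  · rw [if_neg hc]
    have hcf : (cliente == "Regular:") = false := by simpa using hc
    rw [hcf]
    have := foldl_rate false list_data 0
    simp only [if_false, Bool.false_eq_true] at this
    rw [this, zero_add]
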